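-- pv_equiv track=rewrite | github.com/Ayushbh6/DPA_Guru | apps/api/src/upload_api/document_retrieval.py | _normalize_with_map
-- ===== SOURCE A (Python) =====
-- def _normalize_with_map(text: str) -> tuple[str, list[int]]:
--     chars: list[str] = []
--     positions: list[int] = []
--     previous_was_space = False
--     for index, char in enumerate(text):
--         if char.isspace():
--             if previous_was_space:
--                 continue
--             chars.append(" ")
--             positions.append(index)
--             previous_was_space = True
--         else:
--             chars.append(char)
--             positions.append(index)
--             previous_was_space = False
--     normalized = "".join(chars).strip()
--     if not normalized:
--         return "", []
--     leading_trim = len("".join(chars)) - len("".join(chars).lstrip())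
--     if leading_trim:
--         positions = positions[leading_trim:]
--     trailing_trim = len("".join(chars).rstrip())
--     positions = positions[:trailing_trim - leading_trim]
--     return normalized, positions
-- ===== SOURCE B (Python) =====
-- def _normalize_with_map(text: str) -> tuple[str, list[int]]:
--     # Single forward pass with deferred space emission: no join/strip/slice post-pass.
--     chars: list[str] = []
--     positions: list[int] = []
--     started = False
--     pending = None  # index of the first whitespace of the current pending run
--     for index, char in enumerate(text):
--         if char.isspace():
--             if started and pending is None:
--                 pending = index
--         else:
--             if pending is not None:
--                 chars.append(" ")
--                 positions.append(pending)
--                 pending = None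
--             chars.append(char)
--             positions.append(index)
--             started = True
--     return "".join(chars), positions
-- ===== Notes on version B (the rewrite author's own statement) =====
-- stated objective: simpler
-- what changed: B replaces A's build-everything-then-trim pipeline (three joins, strip/lstrip/rstrip and two position slices) by a single forward pass that defers space emission with a started flag and a pending-space index, so no leading/trailing trimming pass is needed.
import Mathlib
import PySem

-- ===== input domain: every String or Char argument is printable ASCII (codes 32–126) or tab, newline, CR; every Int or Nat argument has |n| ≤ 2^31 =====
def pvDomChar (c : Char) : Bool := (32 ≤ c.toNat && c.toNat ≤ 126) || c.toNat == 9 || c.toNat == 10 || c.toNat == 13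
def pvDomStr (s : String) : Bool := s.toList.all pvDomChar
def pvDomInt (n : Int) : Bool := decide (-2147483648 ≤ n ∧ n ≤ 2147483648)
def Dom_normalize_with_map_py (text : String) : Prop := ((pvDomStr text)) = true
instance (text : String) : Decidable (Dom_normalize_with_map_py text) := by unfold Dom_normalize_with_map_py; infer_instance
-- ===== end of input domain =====

-- B replaces A's build-then-join/strip/slice pipeline by a single pass that defers
-- space emission (objective: simpler — no post-pass trimming at all).

-- ===== PORT A =====
-- A's loop over enumerate(text): parallel chars/positions lists and a previous_was_space flag.
def pvALoop : List (Int × Char) → Bool → List Char × List Int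
  | [], _ => ([], [])
  | (i, c) :: rest, prev =>
      if PySem.Chars.isspace c then
        if prev then pvALoop rest true
        else
          let r := pvALoop rest true
          (' ' :: r.1, i :: r.2)
      else
        let r := pvALoop rest false
        (c :: r.1, i :: r.2)

def normalize_with_map_py (text : String) : String × List Int :=
  let r := pvALoop (PySem.List.enumerate text.toList) false
  let chars := r.1
  let positions := r.2
  let normalized := PySem.Chars.strip chars   -- "".join(chars).strip()
  if normalized = [] then ("", [])
  else
    let leading_trim : Int := (chars.length : Int) - ((PySem.Chars.lstrip chars).length : Int)
    let positions1 := if leading_trim ≠ 0 then PySem.List.slice positions (some leading_trim) none else positions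
    let trailing_trim : Int := ((PySem.Chars.rstrip chars).length : Int)
    let positions2 := PySem.List.slice positions1 none (some (trailing_trim - leading_trim))
    (String.mk normalized, positions2)

-- ===== PORT B =====
-- B's loop: started flag and optional pending-space index; no trimming afterwards.
def pvBLoop : List (Int × Char) → Bool → Option Int → List Char × List Int
  | [], _, _ => ([], [])
  | (i, c) :: rest, started, pending =>
      if PySem.Chars.isspace c then
        if started && pending.isNone then pvBLoop rest started (some i)
        else pvBLoop rest started pending
      else
        match pending with
        | some j =>
            let r := pvBLoop rest true none
            (' ' :: c :: r.1, j :: i :: r.2)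
        | none =>
            let r := pvBLoop rest true none
            (c :: r.1, i :: r.2)

def normalize_with_map_py_alt (text : String) : String × List Int :=
  let r := pvBLoop (PySem.List.enumerate text.toList) false none
  (String.mk r.1, r.2)

-- ===== PRECONDITION & SPEC =====
def Spec_normalize_with_map_py (text : String) (out : String × List Int) : Prop := out = normalize_with_map_py_alt text
instance (text : String) (out : String × List Int) : Decidable (Spec_normalize_with_map_py text out) := by unfold Spec_normalize_with_map_py; infer_instance

-- ===== CLAIM (what is proved, stated in full; the proofs are below) =====
def Claim_equal_normalize_with_map_py : Prop := ∀ (text : String), Dom_normalize_with_map_py text → Spec_normalize_with_map_py text (normalize_with_map_py text)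

-- ===== LEMMAS AND PROOFS =====

-- Emission view: the two loops as single lists of (char, original index) pairs.
def pvEA : List (Int × Char) → Bool → List (Char × Int)
  | [], _ => []
  | (i, c) :: rest, prev =>
      if PySem.Chars.isspace c then
        if prev then pvEA rest true else (' ', i) :: pvEA rest true
      else (c, i) :: pvEA rest false

def pvEB : List (Int × Char) → Bool → Option Int → List (Char × Int)
  | [], _, _ => []
  | (i, c) :: rest, started, pending =>
      if PySem.Chars.isspace c then
        if started && pending.isNone then pvEB rest started (some i)
        else pvEB rest started pending
      else
        match pending with
        | some j => (' ', j) :: (c, i) :: pvEB rest true none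
        | none => (c, i) :: pvEB rest true none

-- drop the last emission iff it is a whitespace char
def pvR1 : List (Char × Int) → List (Char × Int)
  | [] => []
  | [x] => if PySem.Chars.isspace x.1 then [] else [x]
  | x :: y :: rest => x :: pvR1 (y :: rest)

theorem pvALoop_eq (l : List (Int × Char)) (p : Bool) :
    pvALoop l p = ((pvEA l p).map Prod.fst, (pvEA l p).map Prod.snd) := by
  induction l generalizing p with
  | nil => rfl
  | cons hd tl ih =>
      obtain ⟨i, c⟩ := hd
      simp only [pvALoop, pvEA]
      split_ifs with h1 h2 <;> simp [ih]

theorem pvBLoop_eq (l : List (Int × Char)) (s : Bool) (pd : Option Int) :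
    pvBLoop l s pd = ((pvEB l s pd).map Prod.fst, (pvEB l s pd).map Prod.snd) := by
  induction l generalizing s pd with
  | nil => rfl
  | cons hd tl ih =>
      obtain ⟨i, c⟩ := hd
      simp only [pvBLoop, pvEB]
      split_ifs with h1 h2
      · exact ih _ _
      · exact ih _ _
      · cases pd <;> simp [ih]

theorem pvR1_cons_of_ne_nil (x : Char × Int) (xs : List (Char × Int)) (h : xs ≠ []) :
    pvR1 (x :: xs) = x :: pvR1 xs := by
  cases xs with
  | nil => exact absurd rfl h
  | cons y r => rfl

theorem pvR1_cons_nonspace (c : Char) (i : Int) (xs : List (Char × Int))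
    (h : PySem.Chars.isspace c = false) :
    pvR1 ((c, i) :: xs) = (c, i) :: pvR1 xs := by
  cases xs with
  | nil => simp [pvR1, h]
  | cons y r => rfl

theorem pvEA_true_head (l : List (Int × Char)) (x : Char × Int) (xs : List (Char × Int))
    (h : pvEA l true = x :: xs) : PySem.Chars.isspace x.1 = false := by
  induction l with
  | nil => simp [pvEA] at h
  | cons hd tl ih =>
      obtain ⟨i, c⟩ := hd
      by_cases hs : PySem.Chars.isspace c
      · exact ih (by simpa [pvEA, hs] using h)
      · simp only [pvEA, if_neg hs] at h
        rw [Bool.not_eq_true] at hs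
        cases h
        simpa using hs

-- main invariant: B's emissions are A's emissions minus a trailing collapsed space
theorem pvMain (l : List (Int × Char)) :
    (∀ j : Int, pvEB l true (some j) = pvR1 ((' ', j) :: pvEA l true))
    ∧ pvEB l true none = pvR1 (pvEA l false)
    ∧ pvEB l false none = pvR1 (pvEA l true) := by
  induction l with
  | nil => refine ⟨fun j => ?_, rfl, rfl⟩; simp [pvEB, pvEA, pvR1]; decide
  | cons hd tl ih =>
      obtain ⟨i, c⟩ := hd
      obtain ⟨ih1, ih2, ih3⟩ := ih
      by_cases hs : PySem.Chars.isspace c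
      · refine ⟨fun j => ?_, ?_, ?_⟩
        · simpa [pvEB, pvEA, hs] using ih1 j
        · simpa [pvEB, pvEA, hs] using ih1 i
        · simpa [pvEB, pvEA, hs] using ih3
      · have hs' : PySem.Chars.isspace c = false := by simpa using hs
        refine ⟨fun j => ?_, ?_, ?_⟩
        · simp only [pvEB, pvEA, hs', if_false, Bool.false_eq_true]
          rw [pvR1_cons_of_ne_nil _ _ (by simp), pvR1_cons_nonspace _ _ _ hs']
          simpa using ih2
        · simp only [pvEB, pvEA, hs', if_false, Bool.false_eq_true]
          rw [pvR1_cons_nonspace _ _ _ hs']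
          simpa using ih2
        · simp only [pvEB, pvEA, hs', if_false, Bool.false_eq_true]
          rw [pvR1_cons_nonspace _ _ _ hs']
          simpa using ih2

-- leading structure: the prev=false run differs from prev=true by at most one leading space
theorem pvLead (l : List (Int × Char)) :
    pvEA l false = pvEA l true ∨ ∃ i : Int, pvEA l false = (' ', i) :: pvEA l true := by
  cases l with
  | nil => left; rfl
  | cons hd tl =>
      obtain ⟨i, c⟩ := hd
      by_cases hs : PySem.Chars.isspace c
      · right; exact ⟨i, by simp [pvEA, hs]⟩
      · left; simp [pvEA, hs]

theorem pvLstrip_true (l : List (Int × Char)) :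
    PySem.Chars.lstrip ((pvEA l true).map Prod.fst) = (pvEA l true).map Prod.fst := by
  cases h : pvEA l true with
  | nil => simp [PySem.Chars.lstrip]
  | cons x xs =>
      have := pvEA_true_head l x xs h
      simp [PySem.Chars.lstrip, List.dropWhile_cons, this]

-- no two adjacent whitespace chars in any emission list
theorem pvChain (l : List (Int × Char)) (p : Bool) :
    ((pvEA l p).map Prod.fst).IsChain (fun a b => ¬(PySem.Chars.isspace a ∧ PySem.Chars.isspace b)) := by
  induction l generalizing p with
  | nil => simp [pvEA, List.isChain_nil]
  | cons hd tl ih =>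
      obtain ⟨i, c⟩ := hd
      by_cases hs : PySem.Chars.isspace c
      · cases p with
        | true => simpa [pvEA, hs] using ih true
        | false =>
            have he : pvEA ((i, c) :: tl) false = (' ', i) :: pvEA tl true := by
              simp [pvEA, hs]
            rw [he, List.map_cons, List.isChain_cons]
            refine ⟨?_, ih true⟩
            intro y hy
            cases h : pvEA tl true with
            | nil => simp [h] at hy
            | cons x xs =>
                have hx := pvEA_true_head tl x xs h
                simp [h] at hy
                subst hy
                simp [hx]
      · have hs' : PySem.Chars.isspace c = false := by simpa using hs
        have he : pvEA ((i, c) :: tl) p = (c, i) :: pvEA tl false := by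
          simp [pvEA, hs']
        rw [he, List.map_cons, List.isChain_cons]
        exact ⟨fun y _ => by simp [hs'], ih false⟩

theorem pvRstrip_nil_iff (cs : List Char) :
    PySem.Chars.rstrip cs = [] ↔ ∀ x ∈ cs, PySem.Chars.isspace x := by
  simp [PySem.Chars.rstrip, List.dropWhile_eq_nil_iff]

theorem pvRstrip_cons (a : Char) (cs : List Char) (h : PySem.Chars.rstrip cs ≠ []) :
    PySem.Chars.rstrip (a :: cs) = a :: PySem.Chars.rstrip cs := by
  have h' : (List.dropWhile PySem.Chars.isspace cs.reverse) ≠ [] := by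
    intro hn; apply h; simp [PySem.Chars.rstrip, hn]
  simp only [PySem.Chars.rstrip, List.reverse_cons, List.dropWhile_append]
  simp [List.isEmpty_iff, h']

theorem pvRstrip_eq_R1 (xs : List (Char × Int))
    (hch : (xs.map Prod.fst).IsChain (fun a b => ¬(PySem.Chars.isspace a ∧ PySem.Chars.isspace b))) :
    PySem.Chars.rstrip (xs.map Prod.fst) = (pvR1 xs).map Prod.fst := by
  induction xs with
  | nil => simp [PySem.Chars.rstrip, pvR1]
  | cons x t ih =>
      cases t with
      | nil =>
          by_cases hx : PySem.Chars.isspace x.1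
          · simp [pvR1, PySem.Chars.rstrip, hx]
          · simp [pvR1, PySem.Chars.rstrip, hx]
      | cons y r =>
          rw [List.map_cons, List.map_cons, List.isChain_cons_cons] at hch
          obtain ⟨hxy, hch'⟩ := hch
          have ih' := ih (by simpa only [List.map_cons] using hch')
          by_cases hr : PySem.Chars.rstrip ((y :: r).map Prod.fst) = []
          · -- everything after x is whitespace: with the chain that forces r = []
            have hall := (pvRstrip_nil_iff _).mp hr
            have hy : PySem.Chars.isspace y.1 := hall y.1 (by simp)
            have hrnil : r = [] := by
              cases r with
              | nil => rfl
              | cons z q =>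
                  exfalso
                  simp only [List.map_cons] at hch'
                  rw [List.isChain_cons_cons] at hch'
                  exact hch'.1 ⟨hy, hall z.1 (by simp)⟩
            subst hrnil
            have hx : PySem.Chars.isspace x.1 = false := by
              by_contra hxx
              exact hxy ⟨by simpa using hxx, hy⟩
            simp [pvR1, PySem.Chars.rstrip, hx, hy]
          · rw [List.map_cons, pvRstrip_cons _ _ hr, ih', pvR1_cons_of_ne_nil x (y :: r) (by simp)]
            rfl

-- pvR1 keeps a prefix
theorem pvR1_prefix (xs : List (Char × Int)) : pvR1 xs = xs ∨ pvR1 xs = xs.dropLast := by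
  induction xs with
  | nil => left; rfl
  | cons x t ih =>
      cases t with
      | nil =>
          by_cases hx : PySem.Chars.isspace x.1
          · right; simp [pvR1, hx]
          · left; simp [pvR1, hx]
      | cons y r =>
          rw [pvR1_cons_of_ne_nil _ _ (by simp)]
          rcases ih with h | h
          · left; rw [h]
          · right; rw [h]; rfl

-- ===== VERDICT (by name: the statement is the Claim_ definition above) =====
theorem normalize_with_map_py_spec : Claim_equal_normalize_with_map_py := by
  intro text _
  unfold Spec_normalize_with_map_py normalize_with_map_py normalize_with_map_py_alt
  set l := PySem.List.enumerate text.toList with hl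
  have hB := pvBLoop_eq l false none
  have hA := pvALoop_eq l false
  have hM := (pvMain l).2.2
  set X := pvEA l true with hX
  -- A's accumulated lists
  have hcs : (pvALoop l false).1 = (pvEA l false).map Prod.fst := by rw [hA]
  have hps : (pvALoop l false).2 = (pvEA l false).map Prod.snd := by rw [hA]
  -- strip chars = fst of pvR1 X
  have hstrip : PySem.Chars.strip ((pvEA l false).map Prod.fst) = (pvR1 X).map Prod.fst := by
    unfold PySem.Chars.strip
    rcases pvLead l with h | ⟨i, h⟩
    · rw [h, ← hX, pvLstrip_true, pvRstrip_eq_R1 X (by rw [hX]; exact pvChain l true)]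
    · rw [h, List.map_cons, PySem.Chars.lstrip, List.dropWhile_cons]
      have : PySem.Chars.isspace ' ' = true := by decide
      rw [this, if_pos rfl]
      have : List.dropWhile PySem.Chars.isspace (X.map Prod.fst) = X.map Prod.fst := pvLstrip_true l
      rw [this, pvRstrip_eq_R1 X (by rw [hX]; exact pvChain l true)]
  -- case split on emptiness of the stripped result
  by_cases hemp : pvR1 X = []
  · -- A returns ("",[]); B's loop result is pvR1 X = []
    have hcond : PySem.Chars.strip ((pvALoop l false).1) = [] := by rw [hcs, hstrip, hemp]; rfl
    rw [if_pos hcond, hB, hM, hemp]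
    rfl
  · have hne : PySem.Chars.strip ((pvALoop l false).1) ≠ [] := by
      rw [hcs, hstrip]; simpa using hemp
    rw [if_neg hne, hB, hM]
    simp only [ne_eq]   -- zeta-reduce the ports' lets
    -- now compute A's positions pipeline
    rcases pvLead l with h | ⟨i, h⟩
    · -- no leading space: leading_trim = 0
      have hlt : ((pvALoop l false).1.length : Int) - ((PySem.Chars.lstrip (pvALoop l false).1).length : Int) = 0 := by
        rw [hcs, h, ← hX, pvLstrip_true]; ring
      rw [hlt, if_neg (by norm_num : ¬((0 : Int) ≠ 0))]
      have htt : ((PySem.Chars.rstrip (pvALoop l false).1).length : Int) = ((pvR1 X).length : Int) := by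
        rw [hcs, h, ← hX, pvRstrip_eq_R1 X (pvChain l true)]
        simp
      rw [htt]
      have hps' : (pvALoop l false).2 = X.map Prod.snd := by rw [hps, h]
      rw [hps']
      rw [sub_zero, PySem.List.slice_to _ (by positivity)]
      rcases pvR1_prefix X with hp | hp
      · rw [hp]; simp [hcs, hstrip, hp]
      · rw [hp]
        simp [hcs, hstrip, hp, List.dropLast_eq_take, List.take_take, ← List.map_take]
    · -- one leading space: leading_trim = 1
      have hX1 : pvEA l false = (' ', i) :: X := by rw [h, hX]
      have hlt : ((pvALoop l false).1.length : Int) - ((PySem.Chars.lstrip (pvALoop l false).1).length : Int) = 1 := by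
        rw [hcs, hX1, List.map_cons, PySem.Chars.lstrip, List.dropWhile_cons]
        have hsp : PySem.Chars.isspace ' ' = true := by decide
        rw [hsp, if_pos rfl]
        have := pvLstrip_true l
        unfold PySem.Chars.lstrip at this
        rw [← hX] at this
        rw [this]
        simp
      rw [hlt, if_pos (by norm_num : ((1 : Int) ≠ 0))]
      have hrX : PySem.Chars.rstrip (X.map Prod.fst) ≠ [] := by
        rw [pvRstrip_eq_R1 X (pvChain l true)]
        simpa using hemp
      have htt : ((PySem.Chars.rstrip (pvALoop l false).1).length : Int) = 1 + ((pvR1 X).length : Int) := by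
        rw [hcs, hX1, List.map_cons, pvRstrip_cons _ _ hrX,
            pvRstrip_eq_R1 X (pvChain l true)]
        simp
        omega
      rw [htt]
      have hps' : (pvALoop l false).2 = i :: X.map Prod.snd := by rw [hps, hX1]; rfl
      rw [hps']
      rw [PySem.List.slice_from _ (by norm_num)]
      have hdrop : (i :: X.map Prod.snd).drop (1 : Int).toNat = X.map Prod.snd := by rfl
      rw [hdrop]
      have : (1 : Int) + ((pvR1 X).length : Int) - 1 = ((pvR1 X).length : Int) := by ring
      rw [this, PySem.List.slice_to _ (by positivity)]
      rcases pvR1_prefix X with hp | hp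
      · rw [hp]; simp [hcs, hstrip, hp]
      · rw [hp]
        simp [hcs, hstrip, hp, List.dropLast_eq_take, List.take_take, ← List.map_take]
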